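-- pv_equiv track=rewrite | github.com/jvillasr/jvillasr.github.io | scripts/update_ads_pubs.py | format_author_display
-- ===== SOURCE A (Python) =====
-- def format_author_display(name: str) -> str:
--     # ADS gives "Last, First Middle" → make "First Middle Last"
--     if "," in name:
--         last, first = [p.strip() for p in name.split(",", 1)]
--         if "," in first:
--             first, suffix = [p.strip() for p in first.split(",", 1)]
--             return f"{first} {last}, {suffix}".strip()
--         return f"{first} {last}".strip()
--     return name
-- ===== SOURCE B (Python) =====
-- def format_author_display(name: str) -> str:
--     # Single character-scan: bucket chars around the first two commas, no split calls.
--     pre, mid, post = [], [], []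
--     commas = 0
--     for ch in name:
--         if ch == ',' and commas < 2:
--             commas += 1
--         elif commas == 0:
--             pre.append(ch)
--         elif commas == 1:
--             mid.append(ch)
--         else:
--             post.append(ch)
--     if commas == 0:
--         return name
--     last = ''.join(pre).strip()
--     first = ''.join(mid).strip()
--     if commas == 1:
--         return f"{first} {last}".strip()
--     suffix = ''.join(post).strip()
--     return f"{first} {last}, {suffix}".strip()
-- ===== Notes on version B (the rewrite author's own statement) =====
-- stated objective: alternative
-- what changed: Replaces library split/re-split calls with one explicit character-scan loop that buckets characters into pre/mid/post accumulators around the first two commas while counting them, assembling the result from the buckets.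
import Mathlib
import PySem

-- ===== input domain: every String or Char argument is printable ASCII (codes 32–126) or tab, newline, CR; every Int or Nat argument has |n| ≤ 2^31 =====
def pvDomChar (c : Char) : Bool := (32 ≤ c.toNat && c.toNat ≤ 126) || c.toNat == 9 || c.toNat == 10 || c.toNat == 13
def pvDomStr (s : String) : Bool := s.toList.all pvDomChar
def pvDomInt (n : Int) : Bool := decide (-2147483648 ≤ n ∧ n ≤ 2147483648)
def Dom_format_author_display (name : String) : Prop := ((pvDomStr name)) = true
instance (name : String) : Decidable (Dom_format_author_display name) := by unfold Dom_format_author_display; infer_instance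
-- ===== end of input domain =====

-- B replaces A's nested library split/re-split by one explicit character-scan loop that
-- buckets characters around the first two commas (objective: alternative decomposition).

-- ===== PORT A =====
def format_author_display (name : String) : String :=
  if PySem.Str.isIn "," name then
    match PySem.Str.splitMax? name "," 1 with
    | some [last₀, first₀] =>
      let last := PySem.Str.strip last₀
      let first := PySem.Str.strip first₀
      if PySem.Str.isIn "," first then
        match PySem.Str.splitMax? first "," 1 with
        | some [first₁, suffix₀] =>
          PySem.Str.strip (PySem.Str.strip first₁ ++ " " ++ last ++ ", " ++ PySem.Str.strip suffix₀)
        | _ => ""  -- unreachable: split(",", 1) of a string containing "," yields exactly 2 parts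
      else
        PySem.Str.strip (first ++ " " ++ last)
    | _ => ""  -- unreachable: split(",", 1) of a string containing "," yields exactly 2 parts
  else
    name

-- ===== PORT B =====
-- the character-scan loop of Source B: state = (pre, mid, post, commas)
def fadLoop : List Char → List Char × List Char × List Char × Nat →
    List Char × List Char × List Char × Nat
  | [], st => st
  | ch :: rest, (pre, mid, post, commas) =>
    if ch = ',' ∧ commas < 2 then fadLoop rest (pre, mid, post, commas + 1)
    else if commas = 0 then fadLoop rest (pre ++ [ch], mid, post, commas)
    else if commas = 1 then fadLoop rest (pre, mid ++ [ch], post, commas)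
    else fadLoop rest (pre, mid, post ++ [ch], commas)

def format_author_display_alt (name : String) : String :=
  let st := fadLoop name.toList ([], [], [], 0)
  let pre := st.1
  let mid := st.2.1
  let post := st.2.2.1
  let commas := st.2.2.2
  if commas = 0 then name
  else
    let last := PySem.Str.strip (String.ofList pre)
    let first := PySem.Str.strip (String.ofList mid)
    if commas = 1 then PySem.Str.strip (first ++ " " ++ last)
    else
      let suffix := PySem.Str.strip (String.ofList post)
      PySem.Str.strip (first ++ " " ++ last ++ ", " ++ suffix)

-- ===== PRECONDITION & SPEC =====
def Spec_format_author_display (name : String) (out : String) : Prop := out = format_author_display_alt name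
instance (name : String) (out : String) : Decidable (Spec_format_author_display name out) := by unfold Spec_format_author_display; infer_instance

-- ===== CLAIM (what is proved, stated in full; the proofs are below) =====
def Claim_equal_format_author_display : Prop := ∀ (name : String), Dom_format_author_display name → Spec_format_author_display name (format_author_display name)

-- ===== LEMMAS AND PROOFS =====

-- dropWhile is idempotent (used for lstrip/rstrip idempotence)
theorem pv_dropWhile_idem (p : Char → Bool) (l : List Char) :
    (l.dropWhile p).dropWhile p = l.dropWhile p := by
  induction l with
  | nil => simp
  | cons x xs ih =>
    by_cases hx : p x
    · simp [hx, ih]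
    · simp [hx]

-- splitOnMax.go with the budget exhausted returns the remainder as one piece
theorem pv_goMax_zero (c : Char) (fuel : Nat) (l cur : List Char) (acc : List (List Char)) :
    PySem.Chars.splitOnMax.go [c] fuel 0 l cur acc = acc.reverse ++ [cur.reverse ++ l] := by
  cases fuel with
  | zero => simp [PySem.Chars.splitOnMax.go]
  | succ f => cases l <;> simp [PySem.Chars.splitOnMax.go]

theorem pv_goMax_one (c : Char) (l : List Char) : ∀ (fuel : Nat) (cur : List Char)
    (acc : List (List Char)), l.length ≤ fuel →
    PySem.Chars.splitOnMax.go [c] fuel 1 l cur acc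
      = acc.reverse ++ (if c ∈ l then
          [cur.reverse ++ l.takeWhile (· ≠ c), (l.dropWhile (· ≠ c)).tail]
        else [cur.reverse ++ l]) := by
  induction l with
  | nil =>
    intro fuel cur acc _
    cases fuel <;> simp [PySem.Chars.splitOnMax.go]
  | cons x xs ih =>
    intro fuel cur acc hf
    cases fuel with
    | zero => simp at hf
    | succ f =>
      have hf' : xs.length ≤ f := by simpa using hf
      by_cases hx : x = c
      · subst hx
        have hpre : List.isPrefixOf [x] (x :: xs) = true := by
          simp [List.isPrefixOf]
        simp only [PySem.Chars.splitOnMax.go, hpre, if_true, one_ne_zero, if_false]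
        rw [show List.drop [x].length (x :: xs) = xs from rfl, pv_goMax_zero]
        simp
      · have hcx : (c == x) = false := by
          simp only [beq_eq_false_iff_ne, ne_eq]
          exact fun e2 => hx e2.symm
        have hpre : List.isPrefixOf [c] (x :: xs) = false := by
          simp [List.isPrefixOf, hcx]
        simp only [PySem.Chars.splitOnMax.go, hpre, Bool.false_eq_true, if_false, one_ne_zero]
        rw [ih f (x :: cur) acc hf']
        have hxc : c ∈ x :: xs ↔ c ∈ xs := by
          constructor
          · intro h
            rcases List.mem_cons.1 h with h | h
            · exact absurd h.symm hx
            · exact h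
          · exact fun h => List.mem_cons_of_mem _ h
        by_cases hm : c ∈ xs
        · simp [hm, hxc.mpr hm, hx]
        · have hnm : c ∉ x :: xs := fun h => hm (hxc.mp h)
          simp [hm, hnm]

theorem pv_splitOnMax_one (c : Char) (s : List Char) :
    PySem.Chars.splitOnMax s [c] 1
      = if c ∈ s then [s.takeWhile (· ≠ c), (s.dropWhile (· ≠ c)).tail] else [s] := by
  rw [PySem.Chars.splitOnMax, if_neg (by norm_num : ¬ ((1:Int) < 0))]
  rw [show ((1:Int)).toNat = 1 from rfl, pv_goMax_one c s (s.length + 1) [] [] (by omega)]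
  by_cases hm : c ∈ s <;> simp [hm]

-- whitespace-stripping facts (the separator is never a whitespace character)
theorem pv_mem_lstrip (c : Char) (hc : PySem.Chars.isspace c = false) (s : List Char) :
    c ∈ PySem.Chars.lstrip s ↔ c ∈ s := by
  rw [PySem.Chars.lstrip]
  have hs := List.takeWhile_append_dropWhile (p := PySem.Chars.isspace) (l := s)
  constructor
  · intro h
    rw [← hs]
    exact List.mem_append_right _ h
  · intro h
    rw [← hs] at h
    rcases List.mem_append.1 h with h1 | h1
    · exact absurd (List.mem_takeWhile_imp h1) (by simp [hc])
    · exact h1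

theorem pv_mem_rstrip (c : Char) (hc : PySem.Chars.isspace c = false) (s : List Char) :
    c ∈ PySem.Chars.rstrip s ↔ c ∈ s := by
  rw [PySem.Chars.rstrip]
  have h := pv_mem_lstrip c hc s.reverse
  rw [PySem.Chars.lstrip] at h
  simpa using h

theorem pv_mem_strip (c : Char) (hc : PySem.Chars.isspace c = false) (s : List Char) :
    c ∈ PySem.Chars.strip s ↔ c ∈ s := by
  rw [PySem.Chars.strip, pv_mem_rstrip c hc, pv_mem_lstrip c hc]

theorem pv_rstrip_cons (c : Char) (hc : PySem.Chars.isspace c = false) (x : List Char) :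
    PySem.Chars.rstrip (c :: x) = c :: PySem.Chars.rstrip x := by
  simp only [PySem.Chars.rstrip, List.reverse_cons, List.dropWhile_append]
  by_cases he : (x.reverse.dropWhile PySem.Chars.isspace).isEmpty
  · simp [hc, List.isEmpty_iff.1 he]
  · simp [he]

theorem pv_rstrip_append (a v : List Char) (hv : PySem.Chars.rstrip v ≠ []) :
    PySem.Chars.rstrip (a ++ v) = a ++ PySem.Chars.rstrip v := by
  have hne : (v.reverse.dropWhile PySem.Chars.isspace).isEmpty = false := by
    cases hvv : v.reverse.dropWhile PySem.Chars.isspace with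
    | nil => exact absurd (by simp [PySem.Chars.rstrip, hvv]) hv
    | cons y ys => simp
  simp [PySem.Chars.rstrip, List.dropWhile_append, hne]

theorem pv_rstrip_append_cons (c : Char) (hc : PySem.Chars.isspace c = false)
    (a x : List Char) : PySem.Chars.rstrip (a ++ c :: x) = a ++ c :: PySem.Chars.rstrip x := by
  rw [pv_rstrip_append a (c :: x) (by rw [pv_rstrip_cons c hc]; simp), pv_rstrip_cons c hc]

theorem pv_lstrip_idem (s : List Char) :
    PySem.Chars.lstrip (PySem.Chars.lstrip s) = PySem.Chars.lstrip s := by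
  simp [PySem.Chars.lstrip, pv_dropWhile_idem]

theorem pv_rstrip_idem (s : List Char) :
    PySem.Chars.rstrip (PySem.Chars.rstrip s) = PySem.Chars.rstrip s := by
  simp [PySem.Chars.rstrip, pv_dropWhile_idem]

theorem pv_rstrip_eq_nil (s : List Char) (h : PySem.Chars.rstrip s = []) :
    PySem.Chars.lstrip s = [] := by
  rw [PySem.Chars.rstrip] at h
  have h' : s.reverse.dropWhile PySem.Chars.isspace = [] := by
    have := congrArg List.reverse h
    simpa using this
  rw [List.dropWhile_eq_nil_iff] at h'
  rw [PySem.Chars.lstrip, List.dropWhile_eq_nil_iff]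
  intro x hx
  exact h' x (by simpa using hx)

theorem pv_lstrip_rstrip_comm (s : List Char) :
    PySem.Chars.lstrip (PySem.Chars.rstrip s) = PySem.Chars.rstrip (PySem.Chars.lstrip s) := by
  induction s with
  | nil => simp [PySem.Chars.lstrip, PySem.Chars.rstrip]
  | cons a w ih =>
    by_cases ha : PySem.Chars.isspace a
    · by_cases he : PySem.Chars.rstrip w = []
      · have hl : PySem.Chars.lstrip w = [] := pv_rstrip_eq_nil w he
        have hvv : w.reverse.dropWhile PySem.Chars.isspace = [] := by
          have := congrArg List.reverse he
          simpa [PySem.Chars.rstrip] using this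
        have hrw : PySem.Chars.rstrip (a :: w) = [] := by
          simp [PySem.Chars.rstrip, List.dropWhile_append, hvv, ha]
        have hlw : PySem.Chars.lstrip (a :: w) = PySem.Chars.lstrip w := by
          simp [PySem.Chars.lstrip, ha]
        rw [hrw, hlw, hl]
        simp [PySem.Chars.lstrip, PySem.Chars.rstrip]
      · have hne : (w.reverse.dropWhile PySem.Chars.isspace).isEmpty = false := by
          cases hvv : w.reverse.dropWhile PySem.Chars.isspace with
          | nil => exact absurd (by simp [PySem.Chars.rstrip, hvv]) he
          | cons y ys => simp
        have hrw : PySem.Chars.rstrip (a :: w) = a :: PySem.Chars.rstrip w := by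
          simp [PySem.Chars.rstrip, List.dropWhile_append, hne]
        have h1 : PySem.Chars.lstrip (a :: PySem.Chars.rstrip w)
            = PySem.Chars.lstrip (PySem.Chars.rstrip w) := by
          simp [PySem.Chars.lstrip, ha]
        have h2 : PySem.Chars.lstrip (a :: w) = PySem.Chars.lstrip w := by
          simp [PySem.Chars.lstrip, ha]
        rw [hrw, h1, h2, ih]
    · have ha' : PySem.Chars.isspace a = false := by simpa using ha
      have h2 : PySem.Chars.lstrip (a :: w) = a :: w := by
        simp [PySem.Chars.lstrip, ha']
      rw [h2, pv_rstrip_cons a ha' w]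
      simp [PySem.Chars.lstrip, ha']

theorem pv_strip_lstrip (s : List Char) :
    PySem.Chars.strip (PySem.Chars.lstrip s) = PySem.Chars.strip s := by
  simp [PySem.Chars.strip, pv_lstrip_idem]

theorem pv_strip_rstrip (s : List Char) :
    PySem.Chars.strip (PySem.Chars.rstrip s) = PySem.Chars.strip s := by
  rw [PySem.Chars.strip, PySem.Chars.strip, pv_lstrip_rstrip_comm, pv_rstrip_idem]

-- takeWhile / dropWhile around the first separator
theorem pv_takeWhile_sep (c : Char) (a x : List Char) (h : ∀ y ∈ a, y ≠ c) :
    (a ++ c :: x).takeWhile (· ≠ c) = a := by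
  induction a with
  | nil => simp
  | cons y a' ih =>
    have hy : y ≠ c := h y (by simp)
    have ih' := ih fun z hz => h z (by simp [hz])
    rw [List.cons_append, List.takeWhile_cons, if_pos (by simpa using hy), ih']

theorem pv_dropWhile_sep (c : Char) (a x : List Char) (h : ∀ y ∈ a, y ≠ c) :
    (a ++ c :: x).dropWhile (· ≠ c) = c :: x := by
  induction a with
  | nil => simp
  | cons y a' ih =>
    have hy : y ≠ c := h y (by simp)
    have ih' := ih fun z hz => h z (by simp [hz])
    rw [List.cons_append, List.dropWhile_cons, if_pos (by simpa using hy), ih']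

theorem pv_dropWhile_mem (c : Char) (u : List Char) (h : c ∈ u) :
    u.dropWhile (· ≠ c) = c :: (u.dropWhile (· ≠ c)).tail := by
  induction u with
  | nil => simp at h
  | cons x xs ih =>
    by_cases hx : x = c
    · subst hx
      simp
    · have hm : c ∈ xs := by
        rcases List.mem_cons.1 h with h1 | h1
        · exact absurd h1.symm hx
        · exact h1
      rw [List.dropWhile_cons, if_pos (by simpa using hx)]
      exact ih hm

-- interaction of the leading-whitespace strip with the first separator
theorem pv_takeWhile_lstrip (c : Char) (hc : PySem.Chars.isspace c = false) (s : List Char) :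
    (PySem.Chars.lstrip s).takeWhile (· ≠ c) = PySem.Chars.lstrip (s.takeWhile (· ≠ c)) := by
  induction s with
  | nil => simp [PySem.Chars.lstrip]
  | cons x xs ih =>
    by_cases hx : PySem.Chars.isspace x
    · have hxc : x ≠ c := fun e => by rw [e, hc] at hx; exact absurd hx (by simp)
      have h1 : PySem.Chars.lstrip (x :: xs) = PySem.Chars.lstrip xs := by
        simp [PySem.Chars.lstrip, hx]
      rw [h1, ih]
      simp [hxc, PySem.Chars.lstrip, hx]
    · have hx' : PySem.Chars.isspace x = false := by simpa using hx
      have h1 : PySem.Chars.lstrip (x :: xs) = x :: xs := by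
        simp [PySem.Chars.lstrip, hx']
      rw [h1]
      by_cases hxc : x = c
      · subst hxc
        simp [PySem.Chars.lstrip]
      · simp [hxc, PySem.Chars.lstrip, hx']

theorem pv_dropWhile_lstrip (c : Char) (hc : PySem.Chars.isspace c = false) (s : List Char) :
    (PySem.Chars.lstrip s).dropWhile (· ≠ c) = s.dropWhile (· ≠ c) := by
  induction s with
  | nil => simp [PySem.Chars.lstrip]
  | cons x xs ih =>
    by_cases hx : PySem.Chars.isspace x
    · have hxc : x ≠ c := fun e => by rw [e, hc] at hx; exact absurd hx (by simp)
      have h1 : PySem.Chars.lstrip (x :: xs) = PySem.Chars.lstrip xs := by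
        simp [PySem.Chars.lstrip, hx]
      rw [h1, ih]
      simp [hxc]
    · have hx' : PySem.Chars.isspace x = false := by simpa using hx
      have h1 : PySem.Chars.lstrip (x :: xs) = x :: xs := by
        simp [PySem.Chars.lstrip, hx']
      rw [h1]

-- the decomposition of strip s at its first separator
theorem pv_strip_decomp (c : Char) (hc : PySem.Chars.isspace c = false) (s : List Char)
    (h : c ∈ s) :
    PySem.Chars.strip s
      = PySem.Chars.lstrip (s.takeWhile (· ≠ c)) ++ c ::
          PySem.Chars.rstrip ((s.dropWhile (· ≠ c)).tail) := by
  have hl : c ∈ PySem.Chars.lstrip s := (pv_mem_lstrip c hc s).mpr h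
  have hdec : PySem.Chars.lstrip s
      = (PySem.Chars.lstrip s).takeWhile (· ≠ c) ++ c ::
          ((PySem.Chars.lstrip s).dropWhile (· ≠ c)).tail := by
    conv_lhs => rw [← List.takeWhile_append_dropWhile (p := fun y => decide (y ≠ c))
      (l := PySem.Chars.lstrip s)]
    rw [pv_dropWhile_mem c _ hl]
    simp
  rw [PySem.Chars.strip, hdec, pv_rstrip_append_cons c hc,
    pv_takeWhile_lstrip c hc, pv_dropWhile_lstrip c hc]

theorem pv_isIn_singleton (c : Char) (s : List Char) :
    PySem.Chars.isIn [c] s = true ↔ c ∈ s := by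
  rw [PySem.Chars.isIn_iff_infix]
  constructor
  · intro h
    exact List.singleton_sublist.1 h.sublist
  · intro h
    rcases List.append_of_mem h with ⟨t1, t2, rfl⟩
    exact ⟨t1, t2, by simp⟩

-- Str.strip only depends on the character list of its argument
theorem pv_strip_congr (X Y : String) (h : X.toList = Y.toList) :
    PySem.Str.strip X = PySem.Str.strip Y := by
  rw [show PySem.Str.strip X = String.ofList (PySem.Chars.strip X.toList) from rfl,
    show PySem.Str.strip Y = String.ofList (PySem.Chars.strip Y.toList) from rfl, h]

-- ===== the loop invariants of B's character scan =====

-- once two commas have been seen, everything (commas included) goes to post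
theorem pv_fadLoop_two (l : List Char) : ∀ pre mid post : List Char,
    fadLoop l (pre, mid, post, 2) = (pre, mid, post ++ l, 2) := by
  induction l with
  | nil => intro pre mid post; simp [fadLoop]
  | cons x xs ih =>
    intro pre mid post
    simp [fadLoop, ih]

-- a comma-free prefix goes entirely to the current bucket (state 0)
theorem pv_fadLoop_free0 (a : List Char) (h : ∀ y ∈ a, y ≠ ',') :
    ∀ (l pre mid post : List Char),
    fadLoop (a ++ l) (pre, mid, post, 0) = fadLoop l (pre ++ a, mid, post, 0) := by
  induction a with
  | nil => intro l pre mid post; simp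
  | cons x xs ih =>
    intro l pre mid post
    have hx : x ≠ ',' := h x (by simp)
    have ih' := ih (fun z hz => h z (by simp [hz]))
    simp only [List.cons_append, fadLoop, hx, false_and, if_false]
    rw [ih']
    simp

-- a comma-free prefix goes entirely to the current bucket (state 1)
theorem pv_fadLoop_free1 (a : List Char) (h : ∀ y ∈ a, y ≠ ',') :
    ∀ (l pre mid post : List Char),
    fadLoop (a ++ l) (pre, mid, post, 1) = fadLoop l (pre, mid ++ a, post, 1) := by
  induction a with
  | nil => intro l pre mid post; simp
  | cons x xs ih =>
    intro l pre mid post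
    have hx : x ≠ ',' := h x (by simp)
    have ih' := ih (fun z hz => h z (by simp [hz]))
    simp only [List.cons_append, fadLoop, hx, false_and, if_false]
    norm_num
    rw [ih']
    simp

-- comma steps
theorem pv_fadLoop_comma0 (l pre mid post : List Char) :
    fadLoop (',' :: l) (pre, mid, post, 0) = fadLoop l (pre, mid, post, 1) := by
  simp [fadLoop]

theorem pv_fadLoop_comma1 (l pre mid post : List Char) :
    fadLoop (',' :: l) (pre, mid, post, 1) = fadLoop l (pre, mid, post, 2) := by
  simp [fadLoop]

theorem pv_main (name : String) :
    format_author_display name = format_author_display_alt name := by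
  have hc : PySem.Chars.isspace ',' = false := by decide
  have hsep : String.toList "," = [','] := by decide
  by_cases hmem : ',' ∈ name.toList
  · -- name contains a comma: l = a ++ ',' :: t with a comma-free
    set l := name.toList with hl
    set a := l.takeWhile (· ≠ ',') with ha
    set t := (l.dropWhile (· ≠ ',')).tail with ht
    have hafree : ∀ y ∈ a, y ≠ ',' := by
      intro y hy
      have := List.mem_takeWhile_imp hy
      simpa using this
    have hdecl : l = a ++ ',' :: t := by
      conv_lhs => rw [← List.takeWhile_append_dropWhile (p := fun y => decide (y ≠ ',')) (l := l)]
      rw [pv_dropWhile_mem ',' l hmem]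
    have hinC : PySem.Chars.isIn [','] l = true :=
      (pv_isIn_singleton ',' _).mpr hmem
    have hAsplit : PySem.Str.splitMax? name "," 1
        = some [String.ofList a, String.ofList t] := by
      have h1 : PySem.Chars.splitMax? l [','] 1 = some [a, t] := by
        rw [show PySem.Chars.splitMax? l [','] 1
            = some (PySem.Chars.splitOnMax l [','] 1) from rfl,
          pv_splitOnMax_one, if_pos hmem]
      rw [show PySem.Str.splitMax? name "," 1
          = (PySem.Chars.splitMax? name.toList (",".toList) 1).map (List.map String.ofList)
          from rfl, hsep, ← hl, h1]
      rfl
    have htlist : (PySem.Str.strip (String.ofList t)).toList = PySem.Chars.strip t := by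
      rw [show PySem.Str.strip (String.ofList t)
          = String.ofList (PySem.Chars.strip (String.ofList t).toList) from rfl]
      simp
    have hBrun : fadLoop l ([], [], [], 0) = fadLoop t (a, [], [], 1) := by
      rw [hdecl, pv_fadLoop_free0 a hafree, pv_fadLoop_comma0]
      simp
    by_cases hmem2 : ',' ∈ t
    · -- at least two commas: t = b ++ ',' :: s with b comma-free
      set b := t.takeWhile (· ≠ ',') with hb
      set s := (t.dropWhile (· ≠ ',')).tail with hs
      have hbfree : ∀ y ∈ b, y ≠ ',' := by
        intro y hy
        have := List.mem_takeWhile_imp hy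
        simpa using this
      have hdect : t = b ++ ',' :: s := by
        conv_lhs => rw [← List.takeWhile_append_dropWhile (p := fun y => decide (y ≠ ',')) (l := t)]
        rw [pv_dropWhile_mem ',' t hmem2]
      have hBfin : fadLoop l ([], [], [], 0) = (a, b, s, 2) := by
        rw [hBrun, hdect, pv_fadLoop_free1 b hbfree, pv_fadLoop_comma1, pv_fadLoop_two]
        simp
      -- A side: strip t contains a comma, and re-splitting it yields lstrip b / rstrip s
      have hmemSD : ',' ∈ PySem.Chars.strip t := (pv_mem_strip ',' hc _).mpr hmem2
      have hlfree : ∀ y ∈ PySem.Chars.lstrip b, y ≠ ',' := by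
        intro y hy
        exact hbfree y ((List.dropWhile_sublist _).mem hy)
      have hdecomp : PySem.Chars.strip t
          = PySem.Chars.lstrip b ++ ',' :: PySem.Chars.rstrip s := by
        rw [pv_strip_decomp ',' hc t hmem2]
      have hTW : (PySem.Chars.strip t).takeWhile (· ≠ ',') = PySem.Chars.lstrip b := by
        rw [hdecomp]
        exact pv_takeWhile_sep ',' _ _ hlfree
      have hDW : (PySem.Chars.strip t).dropWhile (· ≠ ',') = ',' :: PySem.Chars.rstrip s := by
        rw [hdecomp]
        exact pv_dropWhile_sep ',' _ _ hlfree
      have hAsplit2 : PySem.Str.splitMax? (PySem.Str.strip (String.ofList t)) "," 1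
          = some [String.ofList (PySem.Chars.lstrip b), String.ofList (PySem.Chars.rstrip s)] := by
        rw [show PySem.Str.splitMax? (PySem.Str.strip (String.ofList t)) "," 1
            = (PySem.Chars.splitMax? (PySem.Str.strip (String.ofList t)).toList
                (",".toList) 1).map (List.map String.ofList) from rfl, hsep, htlist]
        rw [show PySem.Chars.splitMax? (PySem.Chars.strip t) [','] 1
            = some (PySem.Chars.splitOnMax (PySem.Chars.strip t) [','] 1) from rfl,
          pv_splitOnMax_one, if_pos hmemSD, hTW, hDW]
        rfl
      have hinfC : PySem.Chars.isIn [','] (PySem.Chars.strip t) = true :=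
        (pv_isIn_singleton ',' _).mpr hmemSD
      simp [format_author_display, format_author_display_alt, hinC, hAsplit, hinfC,
        hAsplit2, ← hl, hBfin]
      apply pv_strip_congr
      simp [pv_strip_lstrip, pv_strip_rstrip]
    · -- exactly one comma
      have hBfin : fadLoop l ([], [], [], 0) = (a, t, [], 1) := by
        rw [hBrun, show t = t ++ [] from by simp, pv_fadLoop_free1 t
          (fun y hy => fun e => hmem2 (e ▸ hy)) [] a [] []]
        simp [fadLoop]
      have hninfC : PySem.Chars.isIn [','] (PySem.Chars.strip t) = false := by
        rw [Bool.eq_false_iff]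
        intro h
        exact hmem2 ((pv_mem_strip ',' hc _).mp ((pv_isIn_singleton ',' _).mp h))
      simp [format_author_display, format_author_display_alt, hinC, hAsplit, hninfC,
        ← hl, hBfin]
  · -- no comma: the scan counts zero commas and both sides return name unchanged
    have hinC0 : PySem.Chars.isIn [','] name.toList = false := by
      rw [Bool.eq_false_iff]
      intro h
      exact hmem ((pv_isIn_singleton ',' _).mp h)
    have hBfin : fadLoop name.toList ([], [], [], 0) = (name.toList, [], [], 0) := by
      rw [show name.toList = name.toList ++ ([] : List Char) from by simp,
        pv_fadLoop_free0 name.toList (fun y hy => fun e => hmem (e ▸ hy)) [] [] [] []]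
      simp [fadLoop]
    simp [format_author_display, format_author_display_alt, hinC0, hBfin]

-- ===== VERDICT (by name: the statement is the Claim_ definition above) =====
theorem format_author_display_spec : Claim_equal_format_author_display := by
  intro name _
  unfold Spec_format_author_display
  exact pv_main name
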